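-- pv_equiv track=rewrite | github.com/kasumiXie/kasumi-xie-question-1 | src/question1.py | get_change_point
-- ===== SOURCE A (Python) =====
-- def get_change_point(arr):
--     direction = None
--
--     for i in range(1, len(arr)):
--         if arr[i] > arr[i - 1]:  # Increasing
--             if direction is None:
--                 direction = 'increasing'
--             elif direction == 'decreasing':
--                 return i - 1  # point found
--         elif arr[i] < arr[i - 1]:  # Decreasing
--             if direction is None:
--                 direction = 'decreasing'
--             elif direction == 'increasing':
--                 return i - 1  # point found
--
--     return -1  # No change point
-- ===== SOURCE B (Python) =====
-- def get_change_point(arr):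
--     # Pass 1: sign/run structure — (index, sign) for each strict adjacent change.
--     signs = [(i, 1 if arr[i] > arr[i - 1] else -1)
--              for i in range(1, len(arr)) if arr[i] != arr[i - 1]]
--     if not signs:
--         return -1
--     d = signs[0][1]
--     # Pass 2: first reversal against the initial direction.
--     for i, s in signs[1:]:
--         if s != d:
--             return i - 1
--     return -1
-- ===== Notes on version B (the rewrite author's own statement) =====
-- stated objective: alternative
-- what changed: A's single stateful scan with a direction flag is replaced by a two-pass decomposition: first build the filtered list of (index, sign) pairs of strict adjacent changes, then scan that list for the first sign differing from the initial one.
import Mathlib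
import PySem

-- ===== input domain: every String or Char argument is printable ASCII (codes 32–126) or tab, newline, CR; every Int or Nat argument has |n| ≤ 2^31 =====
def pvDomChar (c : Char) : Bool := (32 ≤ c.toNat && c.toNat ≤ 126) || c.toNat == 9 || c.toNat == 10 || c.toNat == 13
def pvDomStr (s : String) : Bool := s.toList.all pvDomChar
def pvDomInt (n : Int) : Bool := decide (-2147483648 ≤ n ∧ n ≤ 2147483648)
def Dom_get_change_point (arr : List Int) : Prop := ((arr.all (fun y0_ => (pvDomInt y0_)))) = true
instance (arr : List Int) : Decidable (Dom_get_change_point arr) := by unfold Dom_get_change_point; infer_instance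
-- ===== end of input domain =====

-- B replaces A's one stateful direction-flag scan by a two-pass decomposition
-- (filtered (index, sign) list, then a scan for the first reversal); alternative, same cost.


-- ===== PORT A =====
-- A's loop over range(1, len(arr)) with state `direction` (none / some true = 'increasing'
-- / some false = 'decreasing') and early returns. Indices produced by the range are always
-- in bounds, so `.getD 0` after pyGet? never supplies its default.
def getChangePointGoA (arr : List Int) : List Int → Option Bool → Int
  | [], _ => -1
  | i :: rest, dir =>
    let x := (PySem.List.pyGet? arr i).getD 0
    let y := (PySem.List.pyGet? arr (i - 1)).getD 0
    if x > y then
      match dir with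
      | none => getChangePointGoA arr rest (some true)
      | some true => getChangePointGoA arr rest (some true)
      | some false => i - 1
    else if x < y then
      match dir with
      | none => getChangePointGoA arr rest (some false)
      | some false => getChangePointGoA arr rest (some false)
      | some true => i - 1
    else getChangePointGoA arr rest dir

def get_change_point (arr : List Int) : Int :=
  getChangePointGoA arr (PySem.List.pyRange 1 (arr.length : Int) 1) none

-- ===== PORT B =====
-- B pass 1: the comprehension building the filtered (index, sign) list.
def getChangePointSigns (arr : List Int) (l : List Int) : List (Int × Int) :=
  l.filterMap (fun i =>
    let x := (PySem.List.pyGet? arr i).getD 0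
    let y := (PySem.List.pyGet? arr (i - 1)).getD 0
    if x ≠ y then some (i, if x > y then (1 : Int) else (-1 : Int)) else none)

-- B pass 2: scan signs[1:] for the first sign ≠ d.
def getChangePointGoB (d : Int) : List (Int × Int) → Int
  | [] => -1
  | (i, s) :: rest => if s ≠ d then i - 1 else getChangePointGoB d rest

def get_change_point_alt (arr : List Int) : Int :=
  match getChangePointSigns arr (PySem.List.pyRange 1 (arr.length : Int) 1) with
  | [] => -1
  | (_, d) :: rest => getChangePointGoB d rest

-- ===== PRECONDITION & SPEC =====
def Spec_get_change_point (arr : List Int) (out : Int) : Prop := out = get_change_point_alt arr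
instance (arr : List Int) (out : Int) : Decidable (Spec_get_change_point arr out) := by unfold Spec_get_change_point; infer_instance

-- ===== CLAIM (what is proved, stated in full; the proofs are below) =====
def Claim_equal_get_change_point : Prop := ∀ (arr : List Int), Dom_get_change_point arr → Spec_get_change_point arr (get_change_point arr)

-- ===== LEMMAS AND PROOFS =====
-- Invariant linking A's direction state to B's two passes, for any index list l.
theorem getChangePoint_go_eq (arr : List Int) (l : List Int) :
    (getChangePointGoA arr l none =
      (match getChangePointSigns arr l with
       | [] => (-1 : Int)
       | (_, d) :: rest => getChangePointGoB d rest)) ∧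
    getChangePointGoA arr l (some true) = getChangePointGoB 1 (getChangePointSigns arr l) ∧
    getChangePointGoA arr l (some false) = getChangePointGoB (-1) (getChangePointSigns arr l) := by
  induction l with
  | nil => simp [getChangePointGoA, getChangePointSigns, getChangePointGoB]
  | cons i rest ih =>
    obtain ⟨ih0, ih1, ih2⟩ := ih
    set x := (PySem.List.pyGet? arr i).getD 0 with hx
    set y := (PySem.List.pyGet? arr (i - 1)).getD 0 with hy
    by_cases hgt : x > y
    · have hne : x ≠ y := ne_of_gt hgt
      refine ⟨?_, ?_, ?_⟩ <;>
        simp [getChangePointGoA, getChangePointSigns, getChangePointGoB, ← hx, ← hy,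
          hgt, hne, ih0, ih1, ih2, List.filterMap]
    · by_cases hlt : x < y
      · have hne : x ≠ y := ne_of_lt hlt
        have hngt : ¬ x > y := not_lt_of_gt hlt
        refine ⟨?_, ?_, ?_⟩ <;>
          simp [getChangePointGoA, getChangePointSigns, getChangePointGoB, ← hx, ← hy,
            hgt, hlt, hne, ih0, ih1, ih2, List.filterMap]
      · have heq : x = y := le_antisymm (not_lt.mp hgt) (not_lt.mp hlt)
        refine ⟨?_, ?_, ?_⟩ <;>
          simp [getChangePointGoA, getChangePointSigns, getChangePointGoB, ← hx, ← hy,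
            hgt, hlt, heq, ih0, ih1, ih2, List.filterMap]

-- ===== VERDICT (by name: the statement is the Claim_ definition above) =====
theorem get_change_point_spec : Claim_equal_get_change_point := by
  intro arr _
  unfold Spec_get_change_point get_change_point get_change_point_alt
  exact (getChangePoint_go_eq arr _).1
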